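-- pv_equiv track=rewrite | github.com/prodevgit/multi-tenant-saml | utils/functions.py | extract_claims
-- ===== SOURCE A (Python) =====
-- def extract_claims(attributes):
--     claim_keys = {
--         '/displayname':'full_name',
--         '/givenname':'first_name',
--         '/surname':'last_name',
--         '/emailaddress':'email'
--     }
--     claims = {}
--     for key,value in claim_keys.items():
--         for akey,avalue in attributes.items():
--             if key in akey:
--                 claims[value] = avalue[0]
--                 break
--     return claims
-- ===== SOURCE B (Python) =====
-- def extract_claims(attributes):
--     # Single pass over attributes holding four scalar slots (no dict scanning per
--     # claim key); first matching attribute wins, then the claims dict is assembled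
--     # in the fixed field order at the end.
--     full_name = first_name = last_name = email = None
--     for akey, avalue in attributes.items():
--         if full_name is None and '/displayname' in akey:
--             full_name = avalue[0]
--         if first_name is None and '/givenname' in akey:
--             first_name = avalue[0]
--         if last_name is None and '/surname' in akey:
--             last_name = avalue[0]
--         if email is None and '/emailaddress' in akey:
--             email = avalue[0]
--     claims = {}
--     if full_name is not None:
--         claims['full_name'] = full_name
--     if first_name is not None:
--         claims['first_name'] = first_name
--     if last_name is not None:
--         claims['last_name'] = last_name
--     if email is not None:
--         claims['email'] = email
--     return claims
-- ===== Notes on version B (the rewrite author's own statement) =====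
-- stated objective: alternative
-- what changed: A scans the whole attributes dict once per claim key (four passes with break); B makes a single pass over attributes holding four scalar slots (first match wins via a None guard) and assembles the claims dict in the fixed field order at the end.
import Mathlib
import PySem

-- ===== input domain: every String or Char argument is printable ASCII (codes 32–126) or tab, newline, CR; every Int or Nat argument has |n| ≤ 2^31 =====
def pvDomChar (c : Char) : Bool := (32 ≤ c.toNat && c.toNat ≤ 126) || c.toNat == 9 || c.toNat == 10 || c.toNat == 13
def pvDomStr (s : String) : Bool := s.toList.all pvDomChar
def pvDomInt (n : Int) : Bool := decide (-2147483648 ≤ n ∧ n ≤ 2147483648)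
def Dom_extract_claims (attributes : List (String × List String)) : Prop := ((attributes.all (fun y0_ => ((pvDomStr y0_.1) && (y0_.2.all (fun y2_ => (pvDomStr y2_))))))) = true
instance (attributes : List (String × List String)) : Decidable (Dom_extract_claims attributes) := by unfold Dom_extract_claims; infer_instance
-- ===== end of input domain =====

-- B replaces A's four scans of the attributes (one per claim key, with break) by a
-- single pass holding four scalar slots, assembling the claims dict at the end
-- (alternative decomposition, same asymptotic cost).

-- avalue[0]: Python raises IndexError on an empty value list; Pre_ excludes those
-- inputs, so the .getD "" default is never the claimed value.
def pvHd0 (v : List String) : String := (PySem.List.pyGet? v 0).getD ""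

-- ===== PORT A =====
def pvClaimKeys : List (String × String) :=
  [("/displayname", "full_name"), ("/givenname", "first_name"),
   ("/surname", "last_name"), ("/emailaddress", "email")]

-- inner 'for akey,avalue in attributes.items(): if key in akey: claims[value] = avalue[0]; break'
def pvInnerA (key value : String) (attrs : List (String × List String))
    (claims : PySem.Dict String String) : PySem.Dict String String :=
  match attrs with
  | [] => claims
  | (akey, avalue) :: rest =>
      if PySem.Str.isIn key akey then claims.insert value (pvHd0 avalue)
      else pvInnerA key value rest claims

def extract_claims (attributes : List (String × List String)) : List (String × String) :=
  (pvClaimKeys.foldl (fun claims kv => pvInnerA kv.1 kv.2 attributes claims)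
    PySem.Dict.empty).items

-- ===== PORT B =====
-- state: (full_name, first_name, last_name, email), each None until first matched
def pvStepB (st : Option String × Option String × Option String × Option String)
    (p : String × List String) :
    Option String × Option String × Option String × Option String :=
  let fn := if st.1.isNone && PySem.Str.isIn "/displayname" p.1 then some (pvHd0 p.2) else st.1
  let fi := if st.2.1.isNone && PySem.Str.isIn "/givenname" p.1 then some (pvHd0 p.2) else st.2.1
  let la := if st.2.2.1.isNone && PySem.Str.isIn "/surname" p.1 then some (pvHd0 p.2) else st.2.2.1
  let em := if st.2.2.2.isNone && PySem.Str.isIn "/emailaddress" p.1 then some (pvHd0 p.2) else st.2.2.2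
  (fn, fi, la, em)

def extract_claims_alt (attributes : List (String × List String)) : List (String × String) :=
  let st := attributes.foldl pvStepB (none, none, none, none)
  let claims := PySem.Dict.empty (κ := String) (ν := String)
  let claims := match st.1 with | some v => claims.insert "full_name" v | none => claims
  let claims := match st.2.1 with | some v => claims.insert "first_name" v | none => claims
  let claims := match st.2.2.1 with | some v => claims.insert "last_name" v | none => claims
  let claims := match st.2.2.2 with | some v => claims.insert "email" v | none => claims
  claims.items

-- ===== PRECONDITION & SPEC =====
-- Pre_ excludes (a) inputs whose first attribute matching some claim key has an
-- empty value list — there Python A raises IndexError (B raises too) — and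
-- (b) duplicate attribute keys, which a Python dict argument cannot carry (the
-- association-list representation is ambiguous there).
def Pre_extract_claims (attributes : List (String × List String)) : Prop :=
  (attributes.map Prod.fst).Nodup ∧
  ∀ s ∈ ["/displayname", "/givenname", "/surname", "/emailaddress"],
    (attributes.find? (fun p => PySem.Str.isIn s p.1)).all (fun p => !p.2.isEmpty) = true
instance (attributes : List (String × List String)) : Decidable (Pre_extract_claims attributes) := by
  unfold Pre_extract_claims; infer_instance

def pvWitness_extract_claims : (List (String × List String)) :=
  [("x/displayname", ["Ann", "B"]), ("y/emailaddress", ["a@b"]), ("z", [])]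

def Spec_extract_claims (attributes : List (String × List String)) (out : List (String × String)) : Prop := out = extract_claims_alt attributes
instance (attributes : List (String × List String)) (out : List (String × String)) : Decidable (Spec_extract_claims attributes out) := by unfold Spec_extract_claims; infer_instance

-- ===== CLAIM (what is proved, stated in full; the proofs are below) =====
def Claim_equal_extract_claims : Prop := ∀ (attributes : List (String × List String)), Dom_extract_claims attributes → Pre_extract_claims attributes → Spec_extract_claims attributes (extract_claims attributes)

-- ===== LEMMAS AND PROOFS =====

-- the first attribute whose key contains s
def pvFirst (s : String) (attrs : List (String × List String)) : Option (String × List String) :=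
  attrs.find? (fun p => PySem.Str.isIn s p.1)

theorem pvInnerA_eq (key value : String) (attrs : List (String × List String))
    (claims : PySem.Dict String String) :
    pvInnerA key value attrs claims =
      match pvFirst key attrs with
      | some p => claims.insert value (pvHd0 p.2)
      | none => claims := by
  induction attrs with
  | nil => rfl
  | cons p rest ih =>
      obtain ⟨akey, avalue⟩ := p
      simp only [pvInnerA, pvFirst, List.find?]
      by_cases h : PySem.Str.isIn key akey <;> simp at h <;> simp [h]
      simpa [pvFirst] using ih

theorem pvFoldB_eq (attrs : List (String × List String))
    (st : Option String × Option String × Option String × Option String) :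
    attrs.foldl pvStepB st =
      (st.1.or ((pvFirst "/displayname" attrs).map (fun p => pvHd0 p.2)),
       st.2.1.or ((pvFirst "/givenname" attrs).map (fun p => pvHd0 p.2)),
       st.2.2.1.or ((pvFirst "/surname" attrs).map (fun p => pvHd0 p.2)),
       st.2.2.2.or ((pvFirst "/emailaddress" attrs).map (fun p => pvHd0 p.2))) := by
  induction attrs generalizing st with
  | nil => simp [pvFirst]
  | cons p rest ih =>
      obtain ⟨akey, avalue⟩ := p
      obtain ⟨a, b, c, d⟩ := st
      rw [List.foldl_cons, ih]
      simp only [pvFirst, List.find?, pvStepB]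
      by_cases h1 : PySem.Str.isIn "/displayname" akey <;>
        by_cases h2 : PySem.Str.isIn "/givenname" akey <;>
          by_cases h3 : PySem.Str.isIn "/surname" akey <;>
            by_cases h4 : PySem.Str.isIn "/emailaddress" akey <;>
              simp at h1 h2 h3 h4 <;>
              cases a <;> cases b <;> cases c <;> cases d <;>
                simp [h1, h2, h3, h4, Option.or]

theorem extract_claims_spec_aux (attributes : List (String × List String)) :
    extract_claims attributes = extract_claims_alt attributes := by
  unfold extract_claims extract_claims_alt
  rw [pvFoldB_eq]
  simp only [pvClaimKeys, List.foldl_cons, List.foldl_nil, pvInnerA_eq]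
  cases h1 : pvFirst "/displayname" attributes <;>
    cases h2 : pvFirst "/givenname" attributes <;>
      cases h3 : pvFirst "/surname" attributes <;>
        cases h4 : pvFirst "/emailaddress" attributes <;>
          simp [PySem.Dict.insert, PySem.Dict.empty, Option.or]

-- ===== VERDICT (by name: the statement is the Claim_ definition above) =====
theorem extract_claims_spec : Claim_equal_extract_claims := by
  intro attributes _ _
  unfold Spec_extract_claims
  exact extract_claims_spec_aux attributes
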